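-- pv_equiv track=rewrite | github.com/indigorose/Advent_of_Code22 | main.py | lose_count
-- ===== SOURCE A (Python) =====
-- combinations = {
--     "lose": [["B X", 1], ["C X", 2], ["A X", 3]],
--     "draw": [["A Y", 4], ["B Y", 5], ["C Y", 6]],
--     "win": [["C Z", 7], ["A Z", 8], ["B Z", 9]]
-- }
--
-- def lose_count(hands):
--     count = 0
--     for hand in hands:
--         if hand == combinations["lose"][0][0]:
--             count += 1
--         elif hand == combinations["lose"][1][0]:
--             count += 2
--         elif hand == combinations["lose"][2][0]:
--             count += 3
--         elif hand == combinations["draw"][0][0]: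
--             count += 4
--         elif hand == combinations["draw"][1][0]:
--             count += 5
--         elif hand == combinations["draw"][2][0]:
--             count += 6
--         elif hand == combinations["win"][0][0]:
--             count += 7
--         elif hand == combinations["win"][1][0]:
--             count += 8
--         elif hand == combinations["win"][2][0]:
--             count += 9
--         else:
--             count += 0
--     return count
-- ===== SOURCE B (Python) =====
-- _SCORES = {"B X": 1, "C X": 2, "A X": 3,
--            "A Y": 4, "B Y": 5, "C Y": 6,
--            "C Z": 7, "A Z": 8, "B Z": 9}
--
-- def lose_count(hands):
--     counts = {}
--     for hand in hands:
--         counts[hand] = counts.get(hand, 0) + 1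
--     total = 0
--     for key, score in _SCORES.items():
--         total += score * counts.get(key, 0)
--     return total
-- ===== Notes on version B (the rewrite author's own statement) =====
-- stated objective: alternative
-- what changed: B builds a frequency table of the hands in one pass, then totals score*count over the nine fixed hand keys, replacing A's 9-way if/elif comparison chain per element.
import Mathlib
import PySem

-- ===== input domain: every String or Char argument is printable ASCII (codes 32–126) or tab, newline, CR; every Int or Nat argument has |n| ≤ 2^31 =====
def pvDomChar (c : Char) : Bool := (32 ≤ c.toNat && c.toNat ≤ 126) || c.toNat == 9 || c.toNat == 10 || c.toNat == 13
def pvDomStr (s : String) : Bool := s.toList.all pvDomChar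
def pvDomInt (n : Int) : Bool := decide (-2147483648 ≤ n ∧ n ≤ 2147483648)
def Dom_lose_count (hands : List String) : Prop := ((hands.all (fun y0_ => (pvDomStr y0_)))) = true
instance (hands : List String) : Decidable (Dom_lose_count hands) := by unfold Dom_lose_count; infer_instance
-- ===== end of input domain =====

-- B replaces A's per-element 9-way if/elif chain by a one-pass frequency table plus
-- a weighted sum over the nine fixed hand keys (objective: alternative decomposition).

-- ===== PORT A =====
-- the module-level "combinations" dict, as an association list (insertion order)
def pvCombinations : PySem.Dict String (List (List (String × Int))) :=
  ((PySem.Dict.empty.insert "lose" [[("B X", 1)], [("C X", 2)], [("A X", 3)]]).insert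
      "draw" [[("A Y", 4)], [("B Y", 5)], [("C Y", 6)]]).insert
      "win" [[("C Z", 7)], [("A Z", 8)], [("B Z", 9)]]
-- Python stores each entry as a two-element list ["B X", 1]; a heterogeneous list is encoded
-- as a one-element list holding the (string, int) pair — the port only ever reads index [0][0].

-- combinations[key][i][0], exact for the in-range accesses A performs
def pvComb (key : String) (i : Int) : String :=
  (((PySem.List.pyGet? (pvCombinations.getD key []) i).getD []).headD ("", 0)).1

def lose_count (hands : List String) : Int :=
  hands.foldl
    (fun count hand =>
      if hand = pvComb "lose" 0 then count + 1
      else if hand = pvComb "lose" 1 then count + 2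
      else if hand = pvComb "lose" 2 then count + 3
      else if hand = pvComb "draw" 0 then count + 4
      else if hand = pvComb "draw" 1 then count + 5
      else if hand = pvComb "draw" 2 then count + 6
      else if hand = pvComb "win" 0 then count + 7
      else if hand = pvComb "win" 1 then count + 8
      else if hand = pvComb "win" 2 then count + 9
      else count + 0)
    0

-- ===== PORT B =====
def pvScores : List (String × Int) :=
  [("B X", 1), ("C X", 2), ("A X", 3), ("A Y", 4), ("B Y", 5), ("C Y", 6),
   ("C Z", 7), ("A Z", 8), ("B Z", 9)]

def lose_count_alt (hands : List String) : Int :=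
  let counts : PySem.Dict String Int :=
    hands.foldl (fun d hand => d.insert hand (d.getD hand 0 + 1)) PySem.Dict.empty
  pvScores.foldl (fun total p => total + p.2 * counts.getD p.1 0) 0

-- ===== PRECONDITION & SPEC =====
def Spec_lose_count (hands : List String) (out : Int) : Prop := out = lose_count_alt hands
instance (hands : List String) (out : Int) : Decidable (Spec_lose_count hands out) := by unfold Spec_lose_count; infer_instance

-- ===== CLAIM (what is proved, stated in full; the proofs are below) =====
def Claim_equal_lose_count : Prop := ∀ (hands : List String), Dom_lose_count hands → Spec_lose_count hands (lose_count hands)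

-- ===== LEMMAS AND PROOFS =====

-- proof helpers (not part of either port)
def pvScore (h : String) : Int :=
  if h = "B X" then 1 else if h = "C X" then 2 else if h = "A X" then 3
  else if h = "A Y" then 4 else if h = "B Y" then 5 else if h = "C Y" then 6
  else if h = "C Z" then 7 else if h = "A Z" then 8 else if h = "B Z" then 9 else 0

def pvWSum (hands : List String) : Int :=
  1 * hands.count "B X" + 2 * hands.count "C X" + 3 * hands.count "A X" +
  4 * hands.count "A Y" + 5 * hands.count "B Y" + 6 * hands.count "C Y" +
  7 * hands.count "C Z" + 8 * hands.count "A Z" + 9 * hands.count "B Z"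

theorem alt_eq_counts (hands : List String) :
    lose_count_alt hands = pvWSum hands := by
  simp [lose_count_alt, pvScores, pvWSum, List.foldl,
        PySem.Dict.getD_foldl_insert_add_one, PySem.Dict.getD_empty]

theorem wsum_cons (h : String) (t : List String) :
    pvWSum (h :: t) = pvScore h + pvWSum t := by
  unfold pvWSum pvScore
  by_cases h0 : h = "B X"
  · subst h0; simp [List.count_cons]; omega
  by_cases h1 : h = "C X"
  · subst h1; simp [List.count_cons]; omega
  by_cases h2 : h = "A X"
  · subst h2; simp [List.count_cons]; omega
  by_cases h3 : h = "A Y"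
  · subst h3; simp [List.count_cons]; omega
  by_cases h4 : h = "B Y"
  · subst h4; simp [List.count_cons]; omega
  by_cases h5 : h = "C Y"
  · subst h5; simp [List.count_cons]; omega
  by_cases h6 : h = "C Z"
  · subst h6; simp [List.count_cons]; omega
  by_cases h7 : h = "A Z"
  · subst h7; simp [List.count_cons]; omega
  by_cases h8 : h = "B Z"
  · subst h8; simp [List.count_cons]; omega
  simp [List.count_cons, h0, Ne.symm h0, h1, Ne.symm h1, h2, Ne.symm h2, h3, Ne.symm h3, h4, Ne.symm h4, h5, Ne.symm h5, h6, Ne.symm h6, h7, h8] 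

theorem a_fold_eq (hands : List String) : ∀ c : Int,
    hands.foldl
      (fun count hand =>
        if hand = pvComb "lose" 0 then count + 1
        else if hand = pvComb "lose" 1 then count + 2
        else if hand = pvComb "lose" 2 then count + 3
        else if hand = pvComb "draw" 0 then count + 4
        else if hand = pvComb "draw" 1 then count + 5
        else if hand = pvComb "draw" 2 then count + 6
        else if hand = pvComb "win" 0 then count + 7
        else if hand = pvComb "win" 1 then count + 8
        else if hand = pvComb "win" 2 then count + 9
        else count + 0) c = c + pvWSum hands := by
  have e0 : pvComb "lose" 0 = "B X" := by decide
  have e1 : pvComb "lose" 1 = "C X" := by decide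
  have e2 : pvComb "lose" 2 = "A X" := by decide
  have e3 : pvComb "draw" 0 = "A Y" := by decide
  have e4 : pvComb "draw" 1 = "B Y" := by decide
  have e5 : pvComb "draw" 2 = "C Y" := by decide
  have e6 : pvComb "win" 0 = "C Z" := by decide
  have e7 : pvComb "win" 1 = "A Z" := by decide
  have e8 : pvComb "win" 2 = "B Z" := by decide
  induction hands with
  | nil => intro c; simp [pvWSum]
  | cons h t ih =>
    intro c
    rw [List.foldl_cons, ih, wsum_cons, e0, e1, e2, e3, e4, e5, e6, e7, e8]
    unfold pvScore
    split_ifs <;> ring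

-- ===== VERDICT (by name: the statement is the Claim_ definition above) =====
theorem lose_count_spec : Claim_equal_lose_count := by
  intro hands _
  unfold Spec_lose_count
  rw [alt_eq_counts, lose_count, a_fold_eq]
  ring
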